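-- pv_equiv track=rewrite | github.com/dkrnr/matrix-calculator | src/mxcalc/calculate.py | matrixAddSub
-- ===== SOURCE A (Python) =====
-- def matrixAddSub(matrices,oprt):
--     """
--     This is a function to add or substract the given array of matrices
--
--     Args:
--         matrices: matrices to be operated on as a list
--         opr : which operation (add or substract) to be performed, as "-" or "+"
--
--     returns:
--         result: Resulting matrix
--     """
--     finalMatrix = []
--     for j in range(len(matrices[0])):
--         finalMatrix.append([])
--         for k in range(len(matrices[0][0])):
--             sum = 0
--             for m in range(len(matrices)):
--                 if(oprt == "+"):
--                     sum += matrices[m][j][k]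
--                 else:
--                     if(m>0):
--                         sum -= matrices[m][j][k]
--                     else:
--                         sum += matrices[m][j][k]
--             finalMatrix[j].append(sum)
--     return finalMatrix
-- ===== SOURCE B (Python) =====
-- def matrixAddSub(matrices, oprt):
--     rows = len(matrices[0])
--     cols = len(matrices[0][0]) if rows else 0
--     result = [[matrices[0][j][k] for k in range(cols)] for j in range(rows)]
--     sign = 1 if oprt == "+" else -1
--     for m in range(1, len(matrices)):
--         result = [[result[j][k] + sign * matrices[m][j][k] for k in range(cols)]
--                   for j in range(rows)]
--     return result
-- ===== Notes on version B (the rewrite author's own statement) =====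
-- stated objective: alternative
-- what changed: B accumulates matrix-by-matrix (copy the first matrix's rows-cols block, then fold the remaining matrices element-wise with a hoisted sign) instead of A's cell-major triple loop that re-scans all matrices per cell.
import Mathlib
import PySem

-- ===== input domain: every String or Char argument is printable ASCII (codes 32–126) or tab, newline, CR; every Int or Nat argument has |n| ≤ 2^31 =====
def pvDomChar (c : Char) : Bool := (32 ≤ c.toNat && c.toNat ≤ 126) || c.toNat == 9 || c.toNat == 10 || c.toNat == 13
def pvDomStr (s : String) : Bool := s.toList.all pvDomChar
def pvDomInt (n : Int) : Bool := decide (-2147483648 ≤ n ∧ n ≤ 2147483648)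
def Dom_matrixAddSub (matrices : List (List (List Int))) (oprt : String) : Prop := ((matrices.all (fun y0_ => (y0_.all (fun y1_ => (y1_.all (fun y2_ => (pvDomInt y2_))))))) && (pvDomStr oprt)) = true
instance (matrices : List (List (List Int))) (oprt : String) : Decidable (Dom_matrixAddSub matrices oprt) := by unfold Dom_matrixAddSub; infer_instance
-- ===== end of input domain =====

-- B accumulates matrix-by-matrix (copy the first matrix's rows×cols block, then fold
-- the remaining matrices element-wise with a hoisted sign) instead of A's cell-major
-- triple loop; same results, alternative decomposition.

-- ===== PORT A =====
-- literal transliteration of A: for j in range(len(matrices[0])): for k in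
-- range(len(matrices[0][0])): sum over m in range(len(matrices)); indices are
-- in-range nonnegative under Pre_, so Python's xs[i] is List.getD.
def matrixAddSub (matrices : List (List (List Int))) (oprt : String) : List (List Int) :=
  (List.range (matrices.getD 0 []).length).foldl
    (fun finalMatrix j =>
      finalMatrix ++ [((List.range ((matrices.getD 0 []).getD 0 []).length).foldl
        (fun row k =>
          row ++ [((List.range matrices.length).foldl
            (fun sum m =>
              if oprt == "+" then
                sum + (((matrices.getD m []).getD j []).getD k 0)
              else if m > 0 then
                sum - (((matrices.getD m []).getD j []).getD k 0)
              else
                sum + (((matrices.getD m []).getD j []).getD k 0)) 0)])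
        [])]) []

-- ===== PORT B =====
-- literal transliteration of Source B: build the rows×cols block of matrices[0],
-- then for m in range(1, len(matrices)) rebuild result adding sign*matrices[m][j][k].
def matrixAddSub_alt (matrices : List (List (List Int))) (oprt : String) : List (List Int) :=
  let rows := (matrices.getD 0 []).length
  let cols := if rows ≠ 0 then ((matrices.getD 0 []).getD 0 []).length else 0
  let init := (List.range rows).map (fun j =>
    (List.range cols).map (fun k => ((matrices.getD 0 []).getD j []).getD k 0))
  let sign : Int := if oprt == "+" then 1 else -1
  (List.range' 1 (matrices.length - 1)).foldl
    (fun result m =>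
      (List.range rows).map (fun j =>
        (List.range cols).map (fun k =>
          ((result.getD j []).getD k 0) + sign * (((matrices.getD m []).getD j []).getD k 0))))
    init

-- ===== PRECONDITION & SPEC =====
-- Pre_ = exactly the inputs Python A returns on: matrices nonempty (A reads
-- len(matrices[0])), and — unless the column count len(matrices[0][0]) is 0, in which
-- case no cell is ever read — every matrix has at least len(matrices[0]) rows, each of
-- those rows having at least len(matrices[0][0]) entries (else IndexError).
def Pre_matrixAddSub (matrices : List (List (List Int))) (oprt : String) : Prop :=
  matrices ≠ [] ∧
  (((matrices.getD 0 []).getD 0 []).length = 0 ∨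
    ∀ M ∈ matrices, (matrices.getD 0 []).length ≤ M.length ∧
      ∀ row ∈ M.take (matrices.getD 0 []).length,
        ((matrices.getD 0 []).getD 0 []).length ≤ row.length)

instance (matrices : List (List (List Int))) (oprt : String) : Decidable (Pre_matrixAddSub matrices oprt) := by
  unfold Pre_matrixAddSub; infer_instance

def pvWitness_matrixAddSub : List (List (List Int)) × String :=
  ([[[1, 2], [3, 4]], [[5, 6], [7, 8]]], "-")

def Spec_matrixAddSub (matrices : List (List (List Int))) (oprt : String) (out : List (List Int)) : Prop := out = matrixAddSub_alt matrices oprt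
instance (matrices : List (List (List Int))) (oprt : String) (out : List (List Int)) : Decidable (Spec_matrixAddSub matrices oprt out) := by unfold Spec_matrixAddSub; infer_instance

-- ===== CLAIM (what is proved, stated in full; the proofs are below) =====
def Claim_equal_matrixAddSub : Prop := ∀ (matrices : List (List (List Int))) (oprt : String), Dom_matrixAddSub matrices oprt → Pre_matrixAddSub matrices oprt → Spec_matrixAddSub matrices oprt (matrixAddSub matrices oprt)

-- ===== LEMMAS AND PROOFS =====

-- the entry matrices[m][j][k] (0 on out-of-range, never reached under Pre_)
def pvG (matrices : List (List (List Int))) (m j k : Nat) : Int :=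
  ((matrices.getD m []).getD j []).getD k 0

-- sum of matrices[m][j][k] over a list of indices m
def pvS (matrices : List (List (List Int))) (l : List Nat) (j k : Nat) : Int :=
  (l.map (fun m => pvG matrices m j k)).sum

lemma pv_foldl_sub (g : Nat → Int) (l : List Nat) :
    ∀ (a : Int), l.foldl (fun s m => s - g m) a = a - (l.map g).sum := by
  induction l with
  | nil => simp
  | cons x xs ih => intro a; simp [List.foldl_cons, ih]; ring

lemma pv_getD_map_range {a : Type} (f : Nat → a) (n : Nat) (d : a) (j : Nat) (h : j < n) :
    ((List.range n).map f).getD j d = f j := by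
  rw [List.getD_eq_getElem?_getD, List.getElem?_map, List.getElem?_range h]
  simp

-- A's value, in closed form
lemma pvA_eq (matrices : List (List (List Int))) (oprt : String) :
    matrixAddSub matrices oprt =
      (List.range (matrices.getD 0 []).length).map (fun j =>
        (List.range ((matrices.getD 0 []).getD 0 []).length).map (fun k =>
          if oprt == "+" then
            pvG matrices 0 j k + pvS matrices (List.range' 1 (matrices.length - 1)) j k
          else
            pvG matrices 0 j k - pvS matrices (List.range' 1 (matrices.length - 1)) j k)) := by
  unfold matrixAddSub
  rw [PySem.List.foldl_append_singleton_eq_map]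
  simp only [List.nil_append]
  apply List.map_congr_left
  intro j hj
  rw [PySem.List.foldl_append_singleton_eq_map]
  simp only [List.nil_append]
  apply List.map_congr_left
  intro k hk
  by_cases hop : oprt == "+"
  · simp only [hop, if_true]
    cases matrices with
    | nil => simp [pvS, pvG]
    | cons M0 rest =>
      have hrange : List.range (M0 :: rest).length = 0 :: List.range' 1 rest.length := by
        rw [List.range_eq_range']
        simp [List.range'_succ]
      rw [hrange]
      simp only [List.foldl_cons]
      rw [PySem.List.foldl_add]
      simp [pvS, pvG]
  · have hf : (oprt == "+") = false := by simpa using hop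
    simp only [hf, Bool.false_eq_true, if_false]
    cases matrices with
    | nil => simp [pvS, pvG]
    | cons M0 rest =>
      have hrange : List.range (M0 :: rest).length = 0 :: List.range' 1 rest.length := by
        rw [List.range_eq_range']
        simp [List.range'_succ]
      rw [hrange]
      simp only [List.foldl_cons]
      have hcong : (List.range' 1 rest.length).foldl
          (fun s m => if m > 0 then s - (((( M0 :: rest : List (List (List Int))).getD m []).getD j []).getD k 0)
                      else s + ((((M0 :: rest : List (List (List Int))).getD m []).getD j []).getD k 0))
          (0 + (((M0 :: rest : List (List (List Int))).getD 0 []).getD j []).getD k 0)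
          = (List.range' 1 rest.length).foldl
            (fun s m => s - ((((M0 :: rest : List (List (List Int))).getD m []).getD j []).getD k 0))
            (0 + (((M0 :: rest : List (List (List Int))).getD 0 []).getD j []).getD k 0) := by
        apply PySem.List.foldl_congr_mem
        intro acc m hm
        have : 0 < m := by
          have := List.mem_range'.mp hm
          omega
        simp [this]
      simp only [gt_iff_lt, Nat.lt_irrefl, if_false]
      rw [hcong, pv_foldl_sub]
      simp [pvS, pvG]

-- B's fold invariant: after folding m = 1..t, every cell j k holds
-- matrices[0][j][k] + sign * Σ_{m=1}^{t} matrices[m][j][k]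
lemma pvB_inv (matrices : List (List (List Int))) (sign : Int) (rows cols : Nat) :
    ∀ t : Nat,
      (List.range' 1 t).foldl
        (fun result m =>
          (List.range rows).map (fun j =>
            (List.range cols).map (fun k =>
              ((result.getD j []).getD k 0) + sign * pvG matrices m j k)))
        ((List.range rows).map (fun j => (List.range cols).map (fun k => pvG matrices 0 j k)))
      = (List.range rows).map (fun j => (List.range cols).map (fun k =>
          pvG matrices 0 j k + sign * pvS matrices (List.range' 1 t) j k)) := by
  intro t
  induction t with
  | zero => simp [pvS]
  | succ t ih =>
    rw [List.range'_concat, List.foldl_append, ih]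
    simp only [List.foldl_cons, List.foldl_nil]
    apply List.map_congr_left
    intro j hj
    apply List.map_congr_left
    intro k hk
    have hjr : j < rows := List.mem_range.mp hj
    have hkr : k < cols := List.mem_range.mp hk
    simp only [one_mul]
    rw [pv_getD_map_range _ _ _ _ hjr, pv_getD_map_range _ _ _ _ hkr]
    simp only [pvS, List.map_append, List.sum_append, List.map_cons, List.map_nil,
      List.sum_cons, List.sum_nil]
    ring

lemma pvB_eq (matrices : List (List (List Int))) (oprt : String) :
    matrixAddSub_alt matrices oprt =
      (List.range (matrices.getD 0 []).length).map (fun j =>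
        (List.range (if (matrices.getD 0 []).length ≠ 0
                     then ((matrices.getD 0 []).getD 0 []).length else 0)).map (fun k =>
          pvG matrices 0 j k
            + (if oprt == "+" then (1 : Int) else -1)
              * pvS matrices (List.range' 1 (matrices.length - 1)) j k)) := by
  unfold matrixAddSub_alt
  simp only []
  exact pvB_inv matrices _ _ _ (matrices.length - 1)

-- ===== VERDICT (by name: the statement is the Claim_ definition above) =====
theorem matrixAddSub_spec : Claim_equal_matrixAddSub := by
  intro matrices oprt _ hpre
  unfold Spec_matrixAddSub
  rw [pvA_eq, pvB_eq]
  rcases (by omega : (matrices.getD 0 []).length ≠ 0 ∨ (matrices.getD 0 []).length = 0) with h | h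
  · rw [if_pos h]
    apply List.map_congr_left
    intro j _
    apply List.map_congr_left
    intro k _
    by_cases hop : (oprt == "+") = true
    · simp only [hop, if_true]; ring
    · have hf : (oprt == "+") = false := by simpa using hop
      simp only [hf, Bool.false_eq_true, if_false]; ring
  · rw [h]; simp
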